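-- pv_equiv track=rewrite | github.com/byronaltice/MewgenicsBreedingManager | src/save_parser.py | _choose_age_from_creation_days
-- ===== SOURCE A (Python) =====
-- from typing import Iterable, Optional
--
-- def _choose_age_from_creation_days(current_day: int, creation_days: list[int], eternal_youth: bool = False) -> Optional[int]:
--     """
--     Pick the most plausible age from candidate creation_day values.
--
--     Some cat blobs include a zero-padded slot immediately before the real
--     creation_day field. Preferring the largest valid non-zero creation day keeps
--     those cats from being misread as day-0 imports.
--     """
--     valid_days = sorted(
--         {day for day in creation_days if 0 <= day <= current_day},
--         reverse=True,
--     )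
--     if not valid_days:
--         return None
--
--     for creation_day in valid_days:
--         age = current_day - creation_day
--         if age <= 100 or eternal_youth:
--             return age
--     return None
-- ===== SOURCE B (Python) =====
-- from typing import Optional
--
-- def _choose_age_from_creation_days(current_day: int, creation_days: list[int], eternal_youth: bool = False) -> Optional[int]:
--     valid = [day for day in creation_days if 0 <= day <= current_day]
--     if not valid:
--         return None
--     age = current_day - max(valid)
--     if eternal_youth or age <= 100:
--         return age
--     return None
-- ===== Notes on version B (the rewrite author's own statement) =====
-- stated objective: simpler
-- what changed: Replaces the dedup-set + descending sort + scan with a single max() over the valid days: only the largest valid day can ever be returned by A, so B computes that one age directly and checks the 100-day cap once.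
import Mathlib
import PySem

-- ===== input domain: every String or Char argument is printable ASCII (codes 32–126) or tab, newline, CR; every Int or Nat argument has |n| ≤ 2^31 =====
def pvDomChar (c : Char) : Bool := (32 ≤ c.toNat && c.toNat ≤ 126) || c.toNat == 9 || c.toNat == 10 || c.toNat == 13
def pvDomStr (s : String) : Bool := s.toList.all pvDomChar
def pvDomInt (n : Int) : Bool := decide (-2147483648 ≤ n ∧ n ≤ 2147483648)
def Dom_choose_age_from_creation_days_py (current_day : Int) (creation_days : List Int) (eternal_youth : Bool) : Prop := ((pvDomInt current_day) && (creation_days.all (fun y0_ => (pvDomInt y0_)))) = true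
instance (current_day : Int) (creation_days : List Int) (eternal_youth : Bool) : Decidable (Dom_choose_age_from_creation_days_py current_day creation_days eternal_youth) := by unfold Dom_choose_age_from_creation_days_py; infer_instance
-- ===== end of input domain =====

-- B replaces A's dedup-set + descending sort + scan with a single max() pass: only the
-- largest valid day can be returned by A, so B computes that one age and checks the cap once.


-- ===== PORT A =====
-- 'for creation_day in valid_days: …; return None'
def pvLoopA (current_day : Int) (eternal_youth : Bool) : List Int → Option Int
  | [] => none
  | creation_day :: rest =>
    let age := current_day - creation_day
    if age ≤ 100 ∨ eternal_youth = true then some age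
    else pvLoopA current_day eternal_youth rest

def choose_age_from_creation_days_py (current_day : Int) (creation_days : List Int) (eternal_youth : Bool) : Option Int :=
  let valid_days := PySem.List.sorted
    (PySem.Set.ofList (creation_days.filter (fun day => decide (0 ≤ day ∧ day ≤ current_day))))
    (fun x => x) true
  if valid_days = [] then none
  else pvLoopA current_day eternal_youth valid_days

-- ===== PORT B =====
def choose_age_from_creation_days_py_alt (current_day : Int) (creation_days : List Int) (eternal_youth : Bool) : Option Int :=
  let valid := creation_days.filter (fun day => decide (0 ≤ day ∧ day ≤ current_day))
  match PySem.List.max? valid (fun x => x) with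
  | none => none
  | some m =>
    let age := current_day - m
    if eternal_youth || decide (age ≤ 100) then some age else none

-- ===== PRECONDITION & SPEC =====
def Spec_choose_age_from_creation_days_py (current_day : Int) (creation_days : List Int) (eternal_youth : Bool) (out : Option Int) : Prop := out = choose_age_from_creation_days_py_alt current_day creation_days eternal_youth
instance (current_day : Int) (creation_days : List Int) (eternal_youth : Bool) (out : Option Int) : Decidable (Spec_choose_age_from_creation_days_py current_day creation_days eternal_youth out) := by unfold Spec_choose_age_from_creation_days_py; infer_instance

-- ===== CLAIM (what is proved, stated in full; the proofs are below) =====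
def Claim_equal_choose_age_from_creation_days_py : Prop := ∀ (current_day : Int) (creation_days : List Int) (eternal_youth : Bool), Dom_choose_age_from_creation_days_py current_day creation_days eternal_youth → Spec_choose_age_from_creation_days_py current_day creation_days eternal_youth (choose_age_from_creation_days_py current_day creation_days eternal_youth)

-- ===== LEMMAS AND PROOFS =====

-- If the head's age is rejected and all later days are strictly smaller, the loop finds nothing.
lemma pvLoopA_none (cd : Int) (l : List Int) (h : Int)
    (hall : ∀ d ∈ l, d < h) (hage : ¬ (cd - h ≤ 100)) :
    pvLoopA cd false l = none := by
  induction l with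
  | nil => rfl
  | cons d rest ih =>
    have hd : d < h := hall d (by simp)
    have : ¬ (cd - d ≤ 100) := by omega
    simp only [pvLoopA, this, Bool.false_eq_true, or_self, if_false]
    exact ih (fun x hx => hall x (by simp [hx]))

-- ===== VERDICT (by name: the statement is the Claim_ definition above) =====
theorem choose_age_from_creation_days_py_spec : Claim_equal_choose_age_from_creation_days_py := by
  intro cd days ey _
  unfold Spec_choose_age_from_creation_days_py
  unfold choose_age_from_creation_days_py choose_age_from_creation_days_py_alt
  set valid := days.filter (fun day => decide (0 ≤ day ∧ day ≤ cd)) with hvalid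
  set s := PySem.List.sorted (PySem.Set.ofList valid) (fun x => x) true with hs
  by_cases hnil : s = []
  · -- no valid day on either side
    have hset : (PySem.Set.ofList valid : List Int) = [] := by
      rwa [PySem.List.sorted_eq_nil_iff] at hnil
    have hv : valid = [] := by
      apply List.eq_nil_iff_forall_not_mem.mpr
      intro x hx
      have : x ∈ (PySem.Set.ofList valid : List Int) := (PySem.Set.mem_ofList _ _).mpr hx
      simp [hset] at this
    simp only [hnil, hv]
    rfl
  · obtain ⟨h, t, hst⟩ := List.exists_cons_of_ne_nil hnil
    have hmem_s : h ∈ s := by simp [hst]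
    have hmem_valid : h ∈ valid := by
      have := (PySem.List.mem_sorted (xs := (PySem.Set.ofList valid : List Int))
        (key := fun x => x) (rev := true) (x := h)).mp (hs ▸ hmem_s)
      exact (PySem.Set.mem_ofList _ _).mp this
    -- h is the maximum of valid
    have hge : ∀ y ∈ valid, y ≤ h := by
      intro y hy
      exact PySem.List.key_head_sorted_rev_ge _ _ (hs ▸ hst) y ((PySem.Set.mem_ofList _ _).mpr hy)
    obtain ⟨m, hm⟩ : ∃ m, PySem.List.max? valid (fun x => x) = some m := by
      cases hmx : PySem.List.max? valid (fun x => x) with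
      | none =>
        rw [PySem.List.max?_eq_none_iff] at hmx
        simp [hmx] at hmem_valid
      | some m => exact ⟨m, rfl⟩
    have hm_mem : m ∈ valid := PySem.List.max?_mem hm
    have hm_max : ∀ y ∈ valid, y ≤ m := PySem.List.max?_isMax hm
    have hhm : h = m := le_antisymm (hm_max h hmem_valid) (hge m hm_mem)
    -- strict descent along the sorted-distinct tail
    have hnodup : s.Nodup := (PySem.List.sorted_perm _ _ _).nodup_iff.mpr
      (PySem.Set.nodup_ofList valid)
    have hpw : s.Pairwise (fun a b => b ≤ a) := PySem.List.sorted_pairwise_rev _ _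
    have htlt : ∀ d ∈ t, d < h := by
      intro d hd
      have hle : d ≤ h := (List.pairwise_cons.mp (hst ▸ hpw)).1 d hd
      have hne : d ≠ h := by
        have := List.nodup_cons.mp (hst ▸ hnodup)
        intro he; exact this.1 (he ▸ hd)
      omega
    -- compare the two programs
    simp only [hst, if_neg (by simp : (h :: t : List Int) ≠ []), hm, pvLoopA, ← hhm]
    by_cases hage : cd - h ≤ 100
    · simp [hage]
    · cases ey with
      | true => simp
      | false =>
        simp only [Bool.false_eq_true, or_false, Bool.false_or,
          decide_eq_true_eq, if_neg hage]
        exact pvLoopA_none cd t h htlt hage
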